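-- pv_equiv track=rewrite | github.com/phels23/Q-FLAIR | QSVM_IBM/QSVM_ibm.py | ID_pairs
-- ===== SOURCE A (Python) =====
-- def ID_pairs(len_1, len_2=None, exclude_diag=None):
-- 	'''
-- 	Generate all unique pairs of IDs from two lists of given lengths.
-- 	Args:
-- 		len_1: Length of the first list.
-- 		len_2: Length of the second list (optional, defaults to len_1).
-- 	Returns:
-- 		List of tuples containing all unique pairs of IDs.
-- 	'''
-- 	if len_2 is None:
-- 		len_2 = len_1
-- 	if exclude_diag is None:  # Exclude diagonal pairs (i, i) if same length by default
-- 		exclude_diag = (len_1 == len_2)  # Include diagonal pairs if lengths are different by default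
-- 	ID_pairs = []
-- 	for i in range(len_1):
-- 		for j in range(len_2):
-- 			if not (exclude_diag and i == j):
-- 				if (j, i) not in ID_pairs:  # Avoid duplicates (i, j) and (j, i)
-- 					ID_pairs.append((i, j))
-- 	return ID_pairs
-- ===== SOURCE B (Python) =====
-- def ID_pairs(len_1, len_2=None, exclude_diag=None):
--     if len_2 is None:
--         len_2 = len_1
--     if exclude_diag is None:
--         exclude_diag = (len_1 == len_2)
--
--     def row(i):
--         # first column to emit in row i, in closed form
--         if i >= len_2:
--             first = 0          # no mirror pair can exist: keep the whole row
--         elif exclude_diag: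
--             first = i + 1      # strictly above the diagonal
--         else:
--             first = i          # diagonal included
--         return [(i, first + k) for k in range(len_2 - first)]
--
--     return [pair for i in range(len_1) for pair in row(i)]
-- ===== Notes on version B (the rewrite author's own statement) =====
-- stated objective: faster
-- what changed: Replaced the growing accumulator with its quadratic '(j,i) not in ID_pairs' membership scan by a comprehension that concatenates, per row, a closed-form column interval (whole row when i >= len_2, otherwise the upper-triangle suffix from i or i+1); no accumulator or membership test at all.
import Mathlib
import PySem

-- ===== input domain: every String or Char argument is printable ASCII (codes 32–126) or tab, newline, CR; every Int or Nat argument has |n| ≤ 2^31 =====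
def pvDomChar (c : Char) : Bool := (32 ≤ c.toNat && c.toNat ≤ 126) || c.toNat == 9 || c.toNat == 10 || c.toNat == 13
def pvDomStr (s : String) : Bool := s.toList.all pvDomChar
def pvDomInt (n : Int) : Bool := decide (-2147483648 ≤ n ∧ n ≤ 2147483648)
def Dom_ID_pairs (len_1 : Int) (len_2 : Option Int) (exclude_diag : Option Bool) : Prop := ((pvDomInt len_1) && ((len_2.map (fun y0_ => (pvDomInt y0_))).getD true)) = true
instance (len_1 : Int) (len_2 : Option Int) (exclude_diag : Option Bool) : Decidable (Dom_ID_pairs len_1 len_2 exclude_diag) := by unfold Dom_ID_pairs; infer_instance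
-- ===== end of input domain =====

-- B replaces A's quadratic "(j,i) not in ID_pairs" accumulator scan by a comprehension
-- concatenating closed-form column intervals per row (objective: faster, asymptotically).


-- ===== PORT A =====
def ID_pairs (len_1 : Int) (len_2 : Option Int) (exclude_diag : Option Bool) : List (Int × Int) :=
  let len_2 := len_2.getD len_1
  let exclude_diag := exclude_diag.getD (len_1 == len_2)
  (PySem.List.pyRange 0 len_1 1).foldl (fun acc i =>
    (PySem.List.pyRange 0 len_2 1).foldl (fun acc j =>
      if ¬(exclude_diag = true ∧ i = j) then
        if (j, i) ∉ acc then acc ++ [(i, j)] else acc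
      else acc) acc) []

-- ===== PORT B =====
-- Source B's helper `row(i)`: the closed-form column interval of row i.
def pvRowOf (l2 : Int) (e : Bool) (i : Int) : List (Int × Int) :=
  let first : Int := if l2 ≤ i then 0 else if e then i + 1 else i
  (List.range (l2 - first).toNat).map (fun (k : Nat) => (i, first + (k : Int)))

def ID_pairs_alt (len_1 : Int) (len_2 : Option Int) (exclude_diag : Option Bool) : List (Int × Int) :=
  let l2 := len_2.getD len_1
  let e := exclude_diag.getD (len_1 == l2)
  (List.range len_1.toNat).flatMap (fun (i' : Nat) => pvRowOf l2 e (i' : Int))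

-- ===== PRECONDITION & SPEC =====
def Spec_ID_pairs (len_1 : Int) (len_2 : Option Int) (exclude_diag : Option Bool) (out : List (Int × Int)) : Prop := out = ID_pairs_alt len_1 len_2 exclude_diag
instance (len_1 : Int) (len_2 : Option Int) (exclude_diag : Option Bool) (out : List (Int × Int)) : Decidable (Spec_ID_pairs len_1 len_2 exclude_diag out) := by unfold Spec_ID_pairs; infer_instance

-- ===== CLAIM (what is proved, stated in full; the proofs are below) =====
def Claim_equal_ID_pairs : Prop := ∀ (len_1 : Int) (len_2 : Option Int) (exclude_diag : Option Bool), Dom_ID_pairs len_1 len_2 exclude_diag → Spec_ID_pairs len_1 len_2 exclude_diag (ID_pairs len_1 len_2 exclude_diag)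

-- ===== LEMMAS AND PROOFS =====

/-- First emitted column of row `i` in B. -/
def rowStart (l2 : Int) (e : Bool) (i : Int) : Int :=
  if l2 ≤ i then 0 else if e then i + 1 else i

/-- Row `i` written as a mapped `pyRange` (proof-side view of `pvRowOf`). -/
def rowB (l2 : Int) (e : Bool) (i : Int) : List (Int × Int) :=
  (PySem.List.pyRange (rowStart l2 e i) l2 1).map (fun j => (i, j))

theorem rowB_eq_pvRowOf (l2 : Int) (e : Bool) (i : Int) :
    rowB l2 e i = pvRowOf l2 e i := by
  unfold rowB pvRowOf rowStart
  rw [PySem.List.pyRange_one, List.map_map]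
  rfl

/-- A's inner-loop step. -/
def stepA (e : Bool) (i : Int) (acc : List (Int × Int)) (j : Int) : List (Int × Int) :=
  if ¬(e = true ∧ i = j) then
    if (j, i) ∉ acc then acc ++ [(i, j)] else acc
  else acc

/-- B's output restricted to the first `k` rows. -/
def preB (l2 : Int) (e : Bool) (k : Int) : List (Int × Int) :=
  (PySem.List.pyRange 0 k 1).foldl (fun out i => out ++ rowB l2 e i) []

theorem preB_succ (l2 : Int) (e : Bool) (k : Int) (hk : 0 ≤ k) :
    preB l2 e (k + 1) = preB l2 e k ++ rowB l2 e k := by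
  unfold preB
  rw [PySem.List.pyRange_one_succ_right hk, List.foldl_append]
  rfl

theorem mem_rowB (l2 : Int) (e : Bool) (i a b : Int) :
    (a, b) ∈ rowB l2 e i ↔ a = i ∧ rowStart l2 e i ≤ b ∧ b < l2 := by
  simp [rowB, PySem.List.mem_pyRange_one, and_comm, eq_comm]

theorem mem_preB (l2 : Int) (e : Bool) (k : Int) (hk : 0 ≤ k) (a b : Int) :
    (a, b) ∈ preB l2 e k ↔ 0 ≤ a ∧ a < k ∧ rowStart l2 e a ≤ b ∧ b < l2 := by
  induction k, hk using Int.le_induction with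
  | base =>
    unfold preB
    rw [PySem.List.pyRange_one_eq_nil (le_refl (0:Int))]
    simp only [List.foldl_nil, List.not_mem_nil, false_iff]
    rintro ⟨h1, h2, -⟩
    omega
  | succ n hn ih =>
    rw [preB_succ l2 e n hn, List.mem_append, ih, mem_rowB]
    constructor
    · rintro (⟨h1, h2, h3⟩ | ⟨rfl, h⟩) <;> exact ⟨by omega, by omega, by tauto⟩
    · rintro ⟨h1, h2, h3, h4⟩
      by_cases hna : a = n
      · subst hna; right; exact ⟨rfl, h3, h4⟩
      · left; exact ⟨h1, by omega, h3, h4⟩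

theorem mem_preB_pair (l2 : Int) (e : Bool) (i j : Int) (hi : 0 ≤ i) :
    ((j, i) ∈ preB l2 e i ↔ 0 ≤ j ∧ j < i ∧ i < l2) := by
  rw [mem_preB l2 e i hi j i]
  unfold rowStart
  constructor
  · rintro ⟨h1, h2, h3, h4⟩; exact ⟨h1, h2, h4⟩
  · rintro ⟨h1, h2, h3⟩
    refine ⟨h1, h2, ?_, h3⟩
    split_ifs <;> omega

theorem stepA_row (l2 : Int) (e : Bool) (i : Int)
    (acc : List (Int × Int))
    (hacc : ∀ j, ((j, i) ∈ acc ↔ 0 ≤ j ∧ j < i ∧ i < l2))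
    (c : Int) (hc : 0 ≤ c) (hcl : c < l2) :
    stepA e i (acc ++ (PySem.List.pyRange (rowStart l2 e i) c 1).map (fun j => (i, j))) c
      = acc ++ (PySem.List.pyRange (rowStart l2 e i) (c + 1) 1).map (fun j => (i, j)) := by
  by_cases hemit : rowStart l2 e i ≤ c
  · -- column c is emitted by B; A appends (i, c)
    have hskip : ¬(e = true ∧ i = c) := by
      rintro ⟨he', rfl⟩
      have hli : ¬ (l2 ≤ i) := by omega
      simp only [rowStart, if_neg hli, he', if_true] at hemit
      omega
    have hnotmem : (c, i) ∉ acc ++ (PySem.List.pyRange (rowStart l2 e i) c 1).map (fun j => (i, j)) := by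
      intro hmem
      rcases List.mem_append.mp hmem with h | h
      · obtain ⟨-, hci, hil⟩ := (hacc c).mp h
        have hli : ¬ (l2 ≤ i) := by omega
        simp only [rowStart, if_neg hli] at hemit
        by_cases hee : e = true
        · rw [if_pos hee] at hemit; omega
        · rw [if_neg hee] at hemit; omega
      · simp only [List.mem_map, PySem.List.mem_pyRange_one, Prod.mk.injEq] at h
        obtain ⟨x, ⟨hx1, hx2⟩, hic, hxi⟩ := h
        omega
    rw [stepA, if_pos hskip, if_pos hnotmem,
        PySem.List.pyRange_one_succ_right hemit]
    simp
  · -- column c is not emitted by B; A does nothing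
    have hrange : PySem.List.pyRange (rowStart l2 e i) (c + 1) 1 = ([] : List Int) :=
      PySem.List.pyRange_one_eq_nil (by omega)
    have hrange' : PySem.List.pyRange (rowStart l2 e i) c 1 = ([] : List Int) :=
      PySem.List.pyRange_one_eq_nil (by omega)
    rw [hrange, hrange']
    simp only [List.map_nil, List.append_nil]
    have hli : ¬ (l2 ≤ i) := by
      by_contra hli
      simp only [rowStart, if_pos hli] at hemit
      omega
    by_cases hdiag : e = true ∧ i = c
    · rw [stepA, if_neg (by tauto)]
    · have hci : c < i := by
        simp only [rowStart, if_neg hli] at hemit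
        by_cases hee : e = true
        · rw [if_pos hee] at hemit
          have : ¬ (i = c) := fun hic => hdiag ⟨hee, hic⟩
          omega
        · rw [if_neg hee] at hemit; omega
      have hmem : (c, i) ∈ acc := (hacc c).mpr ⟨hc, hci, by omega⟩
      rw [stepA, if_pos hdiag, if_neg (by simp [hmem])]

theorem innerA (l2 : Int) (e : Bool) (i : Int) (hi : 0 ≤ i)
    (acc : List (Int × Int))
    (hacc : ∀ j, ((j, i) ∈ acc ↔ 0 ≤ j ∧ j < i ∧ i < l2)) :
    ∀ (n : Nat) (c : Int), 0 ≤ c → c ≤ l2 → (l2 - c).toNat = n →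
    (PySem.List.pyRange c l2 1).foldl (stepA e i)
        (acc ++ (PySem.List.pyRange (rowStart l2 e i) c 1).map (fun j => (i, j)))
      = acc ++ rowB l2 e i := by
  intro n
  induction n with
  | zero =>
    intro c hc hcl hn
    have : c = l2 := by omega
    subst this
    rw [PySem.List.pyRange_one_eq_nil (le_refl _)]
    rfl
  | succ m ih =>
    intro c hc hcl hn
    have hlt : c < l2 := by omega
    rw [PySem.List.pyRange_one_cons hlt, List.foldl_cons,
        stepA_row l2 e i acc hacc c hc hlt]
    exact ih (c + 1) (by omega) (by omega) (by omega)

theorem outerA (l2 : Int) (e : Bool) (k : Int) (hk : 0 ≤ k) :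
    (PySem.List.pyRange 0 k 1).foldl
        (fun acc i => (PySem.List.pyRange 0 l2 1).foldl (stepA e i) acc) []
      = preB l2 e k := by
  induction k, hk using Int.le_induction with
  | base => rfl
  | succ n hn ih =>
    rw [PySem.List.pyRange_one_succ_right hn, List.foldl_append, ih,
        preB_succ l2 e n hn]
    simp only [List.foldl_cons, List.foldl_nil]
    by_cases hl2 : l2 ≤ 0
    · rw [PySem.List.pyRange_one_eq_nil hl2]
      have : rowB l2 e n = [] := by
        unfold rowB rowStart
        rw [if_pos (by omega), PySem.List.pyRange_one_eq_nil hl2]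
        rfl
      simp [this]
    · have h0 : (0:Int) ≤ l2 := by omega
      have hbase : PySem.List.pyRange (rowStart l2 e n) 0 1 = ([] : List Int) := by
        apply PySem.List.pyRange_one_eq_nil
        unfold rowStart; split_ifs <;> omega
      have := innerA l2 e n hn (preB l2 e n)
        (fun j => mem_preB_pair l2 e n j hn) (l2 - 0).toNat 0 (le_refl 0) h0 rfl
      rw [hbase] at this
      simpa using this

/-- B's flatMap over `List.range` equals the row-fold `preB`. -/
theorem altEq (len_1 l2 : Int) (e : Bool) :
    (List.range len_1.toNat).flatMap (fun (i' : Nat) => pvRowOf l2 e (i' : Int))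
      = preB l2 e len_1 := by
  unfold preB
  rw [PySem.List.foldl_append_eq_flatMap, List.nil_append,
      PySem.List.pyRange_one, List.flatMap_map]
  simp only [Int.sub_zero]
  congr 1
  funext k
  simp [← rowB_eq_pvRowOf]

theorem mainEq (len_1 l2 : Int) (e : Bool) :
    (PySem.List.pyRange 0 len_1 1).foldl
        (fun acc i => (PySem.List.pyRange 0 l2 1).foldl (stepA e i) acc) []
      = (List.range len_1.toNat).flatMap (fun (i' : Nat) => pvRowOf l2 e (i' : Int)) := by
  rw [altEq]
  by_cases h1 : 0 ≤ len_1
  · exact outerA l2 e len_1 h1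
  · unfold preB
    rw [PySem.List.pyRange_one_eq_nil (by omega : len_1 ≤ 0)]
    rfl

-- ===== VERDICT (by name: the statement is the Claim_ definition above) =====
theorem ID_pairs_spec : Claim_equal_ID_pairs := by
  intro len_1 len_2 exclude_diag _
  unfold Spec_ID_pairs
  exact mainEq len_1 (len_2.getD len_1)
    (exclude_diag.getD (len_1 == len_2.getD len_1))
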